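-- pv_equiv track=rewrite | github.com/curiosity-ai/privacy-filter | .reference/opf/_eval/metrics.py | _covered_overlap_length
-- ===== SOURCE A (Python) =====
-- from typing import Any, Callable, Mapping, Sequence
--
-- def _covered_overlap_length(
--     target_start: int,
--     target_end: int,
--     spans: Sequence[tuple[int, int]],
-- ) -> int:
--     """Return the covered overlap length between a target span and many spans."""
--     clipped: list[tuple[int, int]] = []
--     for span_start, span_end in spans:
--         overlap_start = max(target_start, span_start)
--         overlap_end = min(target_end, span_end)
--         if overlap_end <= overlap_start:
--             continue
--         clipped.append((overlap_start, overlap_end))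
--     if not clipped:
--         return 0
--     clipped.sort(key=lambda span: (span[0], span[1]))
--     covered = 0
--     current_start, current_end = clipped[0]
--     for start, end in clipped[1:]:
--         if start <= current_end:
--             current_end = max(current_end, end)
--             continue
--         covered += current_end - current_start
--         current_start, current_end = start, end
--     covered += current_end - current_start
--     return covered
-- ===== SOURCE B (Python) =====
-- def _covered_overlap_length(
--     target_start: int,
--     target_end: int,
--     spans,
-- ) -> int:
--     """Return the covered overlap length between a target span and many spans."""
--     # Interval-subtraction sweep: keep the list of still-uncovered gaps of the
--     # target window; each span carves its overlap out of every gap it meets.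
--     # No sorting and no merge state are needed.
--     total = 0
--     gaps = [(target_start, target_end)] if target_start < target_end else []
--     for s, e in spans:
--         if not gaps:
--             break
--         new_gaps = []
--         for lo, hi in gaps:
--             a = max(lo, s)
--             b = min(hi, e)
--             if b <= a:
--                 new_gaps.append((lo, hi))
--                 continue
--             total += b - a
--             if lo < a:
--                 new_gaps.append((lo, a))
--             if b < hi:
--                 new_gaps.append((b, hi))
--         gaps = new_gaps
--     return total
-- ===== Notes on version B (the rewrite author's own statement) =====
-- stated objective: alternative
-- what changed: A clips every span, sorts the clipped intervals and merges them in a linear sweep; B never sorts: it maintains the list of still-uncovered gaps of the target window and, for each span in input order, carves the span's overlap out of every gap, adding the carved length immediately (stopping early once the window is fully covered).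
import Mathlib
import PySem

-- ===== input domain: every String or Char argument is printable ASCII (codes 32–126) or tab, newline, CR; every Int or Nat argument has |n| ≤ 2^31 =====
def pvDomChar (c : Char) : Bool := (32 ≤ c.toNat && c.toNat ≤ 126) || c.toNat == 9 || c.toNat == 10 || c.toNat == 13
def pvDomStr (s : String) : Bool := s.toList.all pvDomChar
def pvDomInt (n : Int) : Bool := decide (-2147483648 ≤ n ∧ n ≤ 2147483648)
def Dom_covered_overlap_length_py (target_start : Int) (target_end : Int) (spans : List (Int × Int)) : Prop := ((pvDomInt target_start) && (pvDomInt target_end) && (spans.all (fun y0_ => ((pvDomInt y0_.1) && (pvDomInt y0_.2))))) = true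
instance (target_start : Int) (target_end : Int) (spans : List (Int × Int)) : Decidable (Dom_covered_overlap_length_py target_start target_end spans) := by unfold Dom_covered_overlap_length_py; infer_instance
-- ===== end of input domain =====

-- B replaces A's clip/sort/merge sweep by a sort-free interval-subtraction sweep: it keeps the
-- still-uncovered gaps of the target window and carves each span's overlap out of them in input
-- order (objective: alternative algorithm of similar cost; return value only, no mutation).

-- ===== PORT A =====
-- clip loop, then `if not clipped: return 0`, then sort by (start, end), then merge scan;
-- the `| [] => 0` arm of the match is unreachable (clipped ≠ [] there) and mirrors no Python line.
def covered_overlap_length_py (target_start : Int) (target_end : Int) (spans : List (Int × Int)) : Int :=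
  let clipped : List (Int × Int) :=
    spans.foldl (fun acc sp =>
      if min target_end sp.2 ≤ max target_start sp.1 then acc
      else acc ++ [(max target_start sp.1, min target_end sp.2)]) []
  if clipped = [] then 0
  else
    match PySem.List.sorted2 clipped (·.1) (·.2) with
    | [] => 0
    | (cs, ce) :: rest =>
      let r := rest.foldl (fun (st : Int × Int × Int) sp =>
        if sp.1 ≤ st.2.2 then (st.1, st.2.1, max st.2.2 sp.2)
        else (st.1 + (st.2.2 - st.2.1), sp.1, sp.2)) (0, cs, ce)
      r.1 + (r.2.2 - r.2.1)

-- ===== PORT B =====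
-- outer fold over spans (with the `if not gaps: break` short-circuit state pass-through),
-- inner fold over the current gaps building (total, new_gaps), exactly as Source B does.
def covered_overlap_length_py_alt (target_start : Int) (target_end : Int) (spans : List (Int × Int)) : Int :=
  let init : Int × List (Int × Int) :=
    (0, if target_start < target_end then [(target_start, target_end)] else [])
  (spans.foldl (fun st sp =>
      if st.2 = [] then st
      else st.2.foldl (fun (st2 : Int × List (Int × Int)) w =>
          let a := max w.1 sp.1
          let b := min w.2 sp.2
          if b ≤ a then (st2.1, st2.2 ++ [w])
          else (st2.1 + (b - a),
            st2.2 ++ (if w.1 < a then [(w.1, a)] else []) ++ (if b < w.2 then [(b, w.2)] else [])))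
        (st.1, ([] : List (Int × Int))))
    init).1

-- ===== PRECONDITION & SPEC =====
def Spec_covered_overlap_length_py (target_start : Int) (target_end : Int) (spans : List (Int × Int)) (out : Int) : Prop := out = covered_overlap_length_py_alt target_start target_end spans
instance (target_start : Int) (target_end : Int) (spans : List (Int × Int)) (out : Int) : Decidable (Spec_covered_overlap_length_py target_start target_end spans out) := by unfold Spec_covered_overlap_length_py; infer_instance

-- ===== CLAIM (what is proved, stated in full; the proofs are below) =====
def Claim_equal_covered_overlap_length_py : Prop := ∀ (target_start : Int) (target_end : Int) (spans : List (Int × Int)), Dom_covered_overlap_length_py target_start target_end spans → Spec_covered_overlap_length_py target_start target_end spans (covered_overlap_length_py target_start target_end spans)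

-- ===== LEMMAS AND PROOFS =====

-- Both programs compute the number of integer points of [ts, te) covered by some span; pvS is
-- that covered point set (built by explicit enumeration so the definition stays computable).
def pvS (l : List (Int × Int)) : Finset Int :=
  (l.flatMap (fun p => (List.range (p.2 - p.1).toNat).map (fun (i : Nat) => p.1 + (i : Int)))).toFinset

theorem pvS_mem (k : Int) (l : List (Int × Int)) :
    k ∈ pvS l ↔ ∃ p ∈ l, p.1 ≤ k ∧ k < p.2 := by
  simp only [pvS, List.mem_toFinset, List.mem_flatMap, List.mem_map, List.mem_range]
  constructor
  · rintro ⟨p, hp, i, hi, rfl⟩; exact ⟨p, hp, by omega, by omega⟩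
  · rintro ⟨p, hp, h1, h2⟩; exact ⟨p, hp, (k - p.1).toNat, by omega, by omega⟩

theorem pvS_nil : pvS [] = ∅ := rfl

theorem pvS_cons (p : Int × Int) (l : List (Int × Int)) :
    pvS (p :: l) = Finset.Ico p.1 p.2 ∪ pvS l := by
  ext k; simp [pvS_mem, Finset.mem_Ico]

theorem pvS_append (l₁ l₂ : List (Int × Int)) : pvS (l₁ ++ l₂) = pvS l₁ ∪ pvS l₂ := by
  ext k
  simp only [pvS_mem, Finset.mem_union, List.mem_append]
  constructor
  · rintro ⟨p, hp | hp, h1, h2⟩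
    · exact Or.inl ⟨p, hp, h1, h2⟩
    · exact Or.inr ⟨p, hp, h1, h2⟩
  · rintro (⟨p, hp, h1, h2⟩ | ⟨p, hp, h1, h2⟩)
    · exact ⟨p, Or.inl hp, h1, h2⟩
    · exact ⟨p, Or.inr hp, h1, h2⟩

theorem pvS_eq_of_perm {l₁ l₂ : List (Int × Int)} (h : l₁.Perm l₂) : pvS l₁ = pvS l₂ := by
  ext k
  simp only [pvS_mem]
  constructor <;> rintro ⟨p, hp, h1, h2⟩
  · exact ⟨p, h.mem_iff.mp hp, h1, h2⟩
  · exact ⟨p, h.symm.mem_iff.mp hp, h1, h2⟩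

theorem pv_clip_eq (ts te : Int) (spans : List (Int × Int)) :
    spans.foldl (fun acc sp =>
      if min te sp.2 ≤ max ts sp.1 then acc
      else acc ++ [(max ts sp.1, min te sp.2)]) []
    = (spans.filter (fun sp => decide (max ts sp.1 < min te sp.2))).map
        (fun sp => (max ts sp.1, min te sp.2)) := by
  have h : (fun (acc : List (Int × Int)) (sp : Int × Int) =>
      if min te sp.2 ≤ max ts sp.1 then acc
      else acc ++ [(max ts sp.1, min te sp.2)])
      = (fun acc sp =>
      if (fun (sp : Int × Int) => decide (max ts sp.1 < min te sp.2)) sp = true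
      then acc ++ [(max ts sp.1, min te sp.2)] else acc) := by
    funext acc sp
    by_cases hc : min te sp.2 ≤ max ts sp.1 <;> simp [hc] <;> omega
  rw [h, PySem.List.foldl_append_if]
  simp

theorem pv_clipped_S (ts te : Int) (spans : List (Int × Int)) :
    pvS ((spans.filter (fun sp => decide (max ts sp.1 < min te sp.2))).map
        (fun sp => (max ts sp.1, min te sp.2)))
    = Finset.Ico ts te ∩ pvS spans := by
  induction spans with
  | nil => simp [pvS_nil]
  | cons sp t ih =>
    by_cases hc : max ts sp.1 < min te sp.2
    · have hd : (decide (max ts sp.1 < min te sp.2)) = true := by simpa using hc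
      simp only [List.filter_cons, hd, if_pos, List.map_cons, pvS_cons, ih]
      rw [Finset.inter_union_distrib_left, Finset.Ico_inter_Ico]
    · have hd : (decide (max ts sp.1 < min te sp.2)) = false := by simpa using hc
      simp only [List.filter_cons, hd, Bool.false_eq_true, if_neg, not_false_iff, pvS_cons]
      rw [ih, Finset.inter_union_distrib_left, Finset.Ico_inter_Ico]
      have : Finset.Ico (max ts sp.1) (min te sp.2) = ∅ := Finset.Ico_eq_empty (by omega)
      simp [this]

theorem pv_insertBy_pairwise (x : Int × Int) (ys : List (Int × Int))
    (lt : Int × Int → Int × Int → Bool)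
    (hT : ∀ a b, lt a b = true → a.1 ≤ b.1) (hF : ∀ a b, lt a b = false → b.1 ≤ a.1)
    (h : ys.Pairwise (fun a b => a.1 ≤ b.1)) :
    (PySem.List.insertBy lt x ys).Pairwise (fun a b => a.1 ≤ b.1) := by
  induction ys with
  | nil => simp [PySem.List.insertBy]
  | cons y t ih =>
    rcases List.pairwise_cons.mp h with ⟨hy, ht⟩
    by_cases hlt : lt x y = true
    · simp only [PySem.List.insertBy, hlt, if_pos]
      refine List.pairwise_cons.mpr ⟨?_, h⟩
      intro z hz
      rcases List.mem_cons.mp hz with rfl | hz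
      · exact hT _ _ hlt
      · exact le_trans (hT _ _ hlt) (hy z hz)
    · rw [show PySem.List.insertBy lt x (y :: t) = y :: PySem.List.insertBy lt x t by
        simp [PySem.List.insertBy, hlt]]
      refine List.pairwise_cons.mpr ⟨?_, ih ht⟩
      intro z hz
      rcases (PySem.List.mem_insertBy _ _ _ _).mp hz with rfl | hz
      · exact hF _ _ (by simpa using hlt)
      · exact hy z hz

theorem pv_sorted2_pairwise (l : List (Int × Int)) :
    (PySem.List.sorted2 l (·.1) (·.2)).Pairwise (fun a b => a.1 ≤ b.1) := by
  unfold PySem.List.sorted2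
  simp only [if_neg (by decide : ¬ (false = true))]
  suffices h : ∀ (acc : List (Int × Int)), acc.Pairwise (fun a b => a.1 ≤ b.1) →
      (l.foldl (fun acc x => PySem.List.insertBy
        (fun a b => decide (a.1 < b.1) || (!decide (b.1 < a.1) && decide (a.2 < b.2))) x acc) acc
        ).Pairwise (fun a b => a.1 ≤ b.1) by
    exact h [] (by simp)
  induction l with
  | nil => intro acc h; simpa using h
  | cons x t ih =>
    intro acc h
    simp only [List.foldl_cons]
    refine ih _ (pv_insertBy_pairwise x acc _ ?_ ?_ h)
    · intro a b hab
      simp only [Bool.or_eq_true, Bool.and_eq_true, Bool.not_eq_true', decide_eq_true_eq,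
        decide_eq_false_iff_not] at hab
      rcases hab with h1 | ⟨h1, _⟩ <;> omega
    · intro a b hab
      simp only [Bool.or_eq_false_iff, Bool.and_eq_false_iff, Bool.not_eq_false',
        decide_eq_false_iff_not, decide_eq_true_eq] at hab
      omega

theorem pv_merge (t : List (Int × Int)) :
    ∀ (cov cs ce : Int), cs < ce → (∀ p ∈ t, p.1 < p.2) → (∀ p ∈ t, cs ≤ p.1) →
    t.Pairwise (fun a b => a.1 ≤ b.1) →
    (t.foldl (fun (st : Int × Int × Int) sp =>
        if sp.1 ≤ st.2.2 then (st.1, st.2.1, max st.2.2 sp.2)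
        else (st.1 + (st.2.2 - st.2.1), sp.1, sp.2)) (cov, cs, ce)).1
      + ((t.foldl (fun (st : Int × Int × Int) sp =>
        if sp.1 ≤ st.2.2 then (st.1, st.2.1, max st.2.2 sp.2)
        else (st.1 + (st.2.2 - st.2.1), sp.1, sp.2)) (cov, cs, ce)).2.2
        - (t.foldl (fun (st : Int × Int × Int) sp =>
        if sp.1 ≤ st.2.2 then (st.1, st.2.1, max st.2.2 sp.2)
        else (st.1 + (st.2.2 - st.2.1), sp.1, sp.2)) (cov, cs, ce)).2.1)
    = cov + (((Finset.Ico cs ce ∪ pvS t).card : Int)) := by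
  induction t with
  | nil =>
    intro cov cs ce hlt _ _ _
    simp [pvS_nil, Int.card_Ico]
    omega
  | cons hd t ih =>
    intro cov cs ce hce hne hcs hpw
    obtain ⟨s, e⟩ := hd
    have hse : s < e := hne (s, e) (by simp)
    have hcss : cs ≤ s := hcs (s, e) (by simp)
    rcases List.pairwise_cons.mp hpw with ⟨hhd, hpt⟩
    have hnet : ∀ p ∈ t, p.1 < p.2 := fun p hp => hne p (by simp [hp])
    simp only [List.foldl_cons]
    by_cases h : s ≤ ce
    · simp only [if_pos h]
      rw [ih cov cs (max ce e) (by omega) hnet (fun p hp => hcs p (by simp [hp])) hpt]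
      have hset : Finset.Ico cs (max ce e) = Finset.Ico cs ce ∪ Finset.Ico s e := by
        ext k
        simp only [Finset.mem_union, Finset.mem_Ico]
        omega
      rw [hset, pvS_cons, ← Finset.union_assoc]
    · simp only [if_neg h]
      rw [ih (cov + (ce - cs)) s e hse hnet (fun p hp => hhd p hp) hpt]
      have hdisj : Disjoint (Finset.Ico cs ce) (Finset.Ico s e ∪ pvS t) := by
        rw [Finset.disjoint_left]
        intro k hk hk2
        simp only [Finset.mem_Ico] at hk
        rcases Finset.mem_union.mp hk2 with hk2 | hk2
        · simp only [Finset.mem_Ico] at hk2; omega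
        · rcases (pvS_mem k t).mp hk2 with ⟨p, hp, h1, h2⟩
          have := hhd p hp
          omega
      rw [pvS_cons, ← Finset.union_assoc,
        show Finset.Ico cs ce ∪ Finset.Ico s e ∪ pvS t
          = Finset.Ico cs ce ∪ (Finset.Ico s e ∪ pvS t) from Finset.union_assoc ..,
        Finset.card_union_of_disjoint hdisj, Int.card_Ico]
      push_cast
      omega

theorem pv_A_eq_card (ts te : Int) (spans : List (Int × Int)) :
    covered_overlap_length_py ts te spans = ((Finset.Ico ts te ∩ pvS spans).card : Int) := by
  unfold covered_overlap_length_py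
  rw [pv_clip_eq]
  set clipped : List (Int × Int) :=
    (spans.filter (fun sp => decide (max ts sp.1 < min te sp.2))).map
      (fun sp => (max ts sp.1, min te sp.2)) with hclip
  rw [← pv_clipped_S ts te spans]
  by_cases hc : clipped = []
  · rw [if_pos hc, ← hclip, hc, pvS_nil]
    simp
  · simp only [if_neg hc]
    have hperm := PySem.List.sorted2_perm clipped (·.1) (·.2) false
    cases hs : PySem.List.sorted2 clipped (·.1) (·.2) with
    | nil =>
      exfalso
      apply hc
      rw [hs] at hperm
      exact List.eq_nil_of_length_eq_zero hperm.length_eq.symm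
    | cons hd rest =>
      have hmem : ∀ p ∈ hd :: rest, p.1 < p.2 := by
        intro p hp
        rw [← hs] at hp
        have hp' : p ∈ clipped := hperm.mem_iff.mp hp
        rw [hclip] at hp'
        simp only [List.mem_map, List.mem_filter, decide_eq_true_eq] at hp'
        obtain ⟨sp, ⟨_, hlt⟩, rfl⟩ := hp'
        exact hlt
      have hpw : (hd :: rest).Pairwise (fun a b => a.1 ≤ b.1) := by
        rw [← hs]; exact pv_sorted2_pairwise clipped
      rcases List.pairwise_cons.mp hpw with ⟨hhd, hpt⟩
      obtain ⟨cs, ce⟩ := hd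
      dsimp only
      have := pv_merge rest 0 cs ce (hmem (cs, ce) (by simp))
        (fun p hp => hmem p (by simp [hp])) (fun p hp => hhd p hp) hpt
      rw [this]
      have : pvS clipped = pvS ((cs, ce) :: rest) := pvS_eq_of_perm (by rw [← hs]; exact hperm.symm)
      rw [this, pvS_cons, zero_add]

def pvOlen (s e : Int) (w : Int × Int) : Int :=
  if min w.2 e ≤ max w.1 s then 0 else min w.2 e - max w.1 s

def pvPieces (s e : Int) (w : Int × Int) : List (Int × Int) :=
  if min w.2 e ≤ max w.1 s then [w]
  else (if w.1 < max w.1 s then [(w.1, max w.1 s)] else [])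
    ++ (if min w.2 e < w.2 then [(min w.2 e, w.2)] else [])

def pvGapsOK (l : List (Int × Int)) : Prop :=
  l.Pairwise (fun p q => p.2 ≤ q.1 ∨ q.2 ≤ p.1) ∧ ∀ p ∈ l, p.1 < p.2

theorem pv_inner_char (s e : Int) (W : List (Int × Int)) :
    ∀ (tot : Int) (ng : List (Int × Int)),
    W.foldl (fun (st2 : Int × List (Int × Int)) w =>
        let a := max w.1 s
        let b := min w.2 e
        if b ≤ a then (st2.1, st2.2 ++ [w])
        else (st2.1 + (b - a),
          st2.2 ++ (if w.1 < a then [(w.1, a)] else []) ++ (if b < w.2 then [(b, w.2)] else [])))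
      (tot, ng)
    = (tot + (W.map (pvOlen s e)).sum, ng ++ W.flatMap (pvPieces s e)) := by
  induction W with
  | nil => intro tot ng; simp
  | cons w W ih =>
    intro tot ng
    simp only [List.foldl_cons, List.map_cons, List.sum_cons, List.flatMap_cons]
    by_cases hc : min w.2 e ≤ max w.1 s
    · rw [show (let a := max w.1 s; let b := min w.2 e;
        if b ≤ a then (tot, ng ++ [w])
        else (tot + (b - a),
          ng ++ (if w.1 < a then [(w.1, a)] else []) ++ (if b < w.2 then [(b, w.2)] else [])))
        = (tot, ng ++ [w]) by simp [hc]]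
      rw [ih]
      simp [pvOlen, pvPieces, hc]
    · rw [show (let a := max w.1 s; let b := min w.2 e;
        if b ≤ a then (tot, ng ++ [w])
        else (tot + (b - a),
          ng ++ (if w.1 < a then [(w.1, a)] else []) ++ (if b < w.2 then [(b, w.2)] else [])))
        = (tot + (min w.2 e - max w.1 s),
          ng ++ ((if w.1 < max w.1 s then [(w.1, max w.1 s)] else [])
            ++ (if min w.2 e < w.2 then [(min w.2 e, w.2)] else []))) by
          simp [hc, List.append_assoc]]
      rw [ih]
      simp [pvOlen, pvPieces, hc, List.append_assoc]
      omega

theorem pv_olen_sum (s e : Int) (W : List (Int × Int)) (h : pvGapsOK W) :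
    (W.map (pvOlen s e)).sum = (((pvS W ∩ Finset.Ico s e).card : Int)) := by
  obtain ⟨hpw, hne⟩ := h
  induction W with
  | nil => simp [pvS_nil]
  | cons w W ih =>
    rcases List.pairwise_cons.mp hpw with ⟨hw, hpt⟩
    have hdisj : Disjoint (Finset.Ico w.1 w.2 ∩ Finset.Ico s e) (pvS W ∩ Finset.Ico s e) := by
      rw [Finset.disjoint_left]
      intro k hk hk2
      simp only [Finset.mem_inter, Finset.mem_Ico] at hk hk2
      rcases (pvS_mem k W).mp hk2.1 with ⟨p, hp, h1, h2⟩
      have := hw p hp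
      omega
    rw [List.map_cons, List.sum_cons, pvS_cons, Finset.union_inter_distrib_right,
      Finset.card_union_of_disjoint hdisj,
      ih hpt (fun p hp => hne p (List.mem_cons_of_mem w hp))]
    have hcard : ((Finset.Ico w.1 w.2 ∩ Finset.Ico s e).card : Int) = pvOlen s e w := by
      rw [Finset.Ico_inter_Ico, Int.card_Ico, pvOlen]
      split_ifs with hc <;> omega
    push_cast
    omega

theorem pv_piece_bounds (s e : Int) (w : Int × Int) :
    ∀ p ∈ pvPieces s e w, w.1 ≤ p.1 ∧ p.2 ≤ w.2 := by
  intro p hp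
  unfold pvPieces at hp
  by_cases h1 : min w.2 e ≤ max w.1 s
  · rw [if_pos h1] at hp
    simp only [List.mem_singleton] at hp
    subst hp
    exact ⟨le_refl _, le_refl _⟩
  · rw [if_neg h1] at hp
    rcases List.mem_append.mp hp with h | h
    · by_cases h2 : w.1 < max w.1 s
      · rw [if_pos h2] at h
        simp only [List.mem_singleton] at h
        subst h
        exact ⟨le_refl _, by simp only; omega⟩
      · rw [if_neg h2] at h
        simp at h
    · by_cases h3 : min w.2 e < w.2
      · rw [if_pos h3] at h
        simp only [List.mem_singleton] at h
        subst h
        exact ⟨by simp only; omega, le_refl _⟩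
      · rw [if_neg h3] at h
        simp at h

theorem pv_piece_ne (s e : Int) (w : Int × Int) (hw : w.1 < w.2) :
    ∀ p ∈ pvPieces s e w, p.1 < p.2 := by
  intro p hp
  unfold pvPieces at hp
  by_cases h1 : min w.2 e ≤ max w.1 s
  · rw [if_pos h1] at hp
    simp only [List.mem_singleton] at hp
    subst hp
    exact hw
  · rw [if_neg h1] at hp
    rcases List.mem_append.mp hp with h | h
    · by_cases h2 : w.1 < max w.1 s
      · rw [if_pos h2] at h
        simp only [List.mem_singleton] at h
        subst h
        simpa using h2
      · rw [if_neg h2] at h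
        simp at h
    · by_cases h3 : min w.2 e < w.2
      · rw [if_pos h3] at h
        simp only [List.mem_singleton] at h
        subst h
        simpa using h3
      · rw [if_neg h3] at h
        simp at h

theorem pv_pieces_pairwise (s e : Int) (w : Int × Int) :
    (pvPieces s e w).Pairwise (fun p q => p.2 ≤ q.1 ∨ q.2 ≤ p.1) := by
  unfold pvPieces
  split_ifs <;> simp <;> omega

theorem pv_pvS_pieces (s e : Int) (w : Int × Int) :
    pvS (pvPieces s e w) = Finset.Ico w.1 w.2 \ Finset.Ico s e := by
  unfold pvPieces
  split_ifs with h1 h2 h3 h2 h3 <;>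
    ext k <;>
    simp [pvS_cons, pvS_nil, Finset.mem_sdiff, Finset.mem_Ico] <;>
    omega

theorem pv_pvS_flatMap (s e : Int) (W : List (Int × Int)) :
    pvS (W.flatMap (pvPieces s e)) = pvS W \ Finset.Ico s e := by
  induction W with
  | nil => simp [pvS_nil]
  | cons w W ih =>
    rw [List.flatMap_cons, pvS_append, pv_pvS_pieces, ih, pvS_cons,
      Finset.union_sdiff_distrib]

theorem pv_gapsOK_flatMap (s e : Int) (W : List (Int × Int)) (h : pvGapsOK W) :
    pvGapsOK (W.flatMap (pvPieces s e)) := by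
  obtain ⟨hpw, hne⟩ := h
  constructor
  · rw [List.pairwise_flatMap]
    refine ⟨fun w _ => pv_pieces_pairwise s e w, ?_⟩
    refine List.Pairwise.imp_of_mem ?_ hpw
    intro w1 w2 hw1 hw2 hsep x hx y hy
    have hbx := pv_piece_bounds s e w1 x hx
    have hby := pv_piece_bounds s e w2 y hy
    omega
  · intro p hp
    rcases List.mem_flatMap.mp hp with ⟨w, hw, hpw2⟩
    exact pv_piece_ne s e w (hne w hw) p hpw2

theorem pv_card_split (A B C : Finset Int) :
    (A ∩ (B ∪ C)).card = (A ∩ B).card + ((A \ B) ∩ C).card := by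
  have hset : A ∩ (B ∪ C) = (A ∩ B) ∪ ((A \ B) ∩ C) := by
    ext k
    simp only [Finset.mem_inter, Finset.mem_union, Finset.mem_sdiff]
    tauto
  rw [hset, Finset.card_union_of_disjoint]
  rw [Finset.disjoint_left]
  intro k hk hk2
  simp only [Finset.mem_inter, Finset.mem_sdiff] at hk hk2
  tauto

theorem pv_outer (spans : List (Int × Int)) :
    ∀ (tot : Int) (W : List (Int × Int)), pvGapsOK W →
    (spans.foldl (fun st sp =>
      if st.2 = [] then st
      else st.2.foldl (fun (st2 : Int × List (Int × Int)) w =>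
          let a := max w.1 sp.1
          let b := min w.2 sp.2
          if b ≤ a then (st2.1, st2.2 ++ [w])
          else (st2.1 + (b - a),
            st2.2 ++ (if w.1 < a then [(w.1, a)] else []) ++ (if b < w.2 then [(b, w.2)] else [])))
        (st.1, ([] : List (Int × Int)))) (tot, W)).1
    = tot + ((pvS W ∩ pvS spans).card : Int) := by
  induction spans with
  | nil => intro tot W _; simp [pvS_nil]
  | cons sp rest ih =>
    intro tot W hok
    simp only [List.foldl_cons]
    by_cases hW : W = []
    · rw [show (if (tot, W).2 = [] then (tot, W)
          else ((tot, W).2.foldl (fun (st2 : Int × List (Int × Int)) w =>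
            let a := max w.1 sp.1
            let b := min w.2 sp.2
            if b ≤ a then (st2.1, st2.2 ++ [w])
            else (st2.1 + (b - a),
              st2.2 ++ (if w.1 < a then [(w.1, a)] else []) ++ (if b < w.2 then [(b, w.2)] else [])))
            ((tot, W).1, ([] : List (Int × Int))))) = (tot, W) by simp [hW]]
      rw [ih tot W hok, hW, pvS_nil]
      simp
    · rw [show (if (tot, W).2 = [] then (tot, W)
          else ((tot, W).2.foldl (fun (st2 : Int × List (Int × Int)) w =>
            let a := max w.1 sp.1
            let b := min w.2 sp.2
            if b ≤ a then (st2.1, st2.2 ++ [w])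
            else (st2.1 + (b - a),
              st2.2 ++ (if w.1 < a then [(w.1, a)] else []) ++ (if b < w.2 then [(b, w.2)] else [])))
            ((tot, W).1, ([] : List (Int × Int)))))
          = (tot + (W.map (pvOlen sp.1 sp.2)).sum, W.flatMap (pvPieces sp.1 sp.2)) by
          rw [if_neg (by simpa using hW)]
          exact (pv_inner_char sp.1 sp.2 W tot []).trans (by simp)]
      rw [ih _ _ (pv_gapsOK_flatMap sp.1 sp.2 W hok), pv_pvS_flatMap,
        pv_olen_sum sp.1 sp.2 W hok, pvS_cons, pv_card_split]
      push_cast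
      omega

theorem pv_B_eq_card (ts te : Int) (spans : List (Int × Int)) :
    covered_overlap_length_py_alt ts te spans = ((Finset.Ico ts te ∩ pvS spans).card : Int) := by
  unfold covered_overlap_length_py_alt
  by_cases h : ts < te
  · rw [show (if ts < te then [(ts, te)] else []) = [(ts, te)] from if_pos h]
    rw [pv_outer spans 0 [(ts, te)] ⟨by simp, by simp; omega⟩]
    rw [show pvS [(ts, te)] = Finset.Ico ts te by rw [pvS_cons, pvS_nil]; simp]
    omega
  · rw [show (if ts < te then [(ts, te)] else []) = [] from if_neg h]
    rw [pv_outer spans 0 [] ⟨by simp, by simp⟩, pvS_nil,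
      show Finset.Ico ts te = ∅ from Finset.Ico_eq_empty (by omega)]
    simp

-- ===== VERDICT (by name: the statement is the Claim_ definition above) =====
theorem covered_overlap_length_py_spec : Claim_equal_covered_overlap_length_py := by
  intro ts te spans _
  unfold Spec_covered_overlap_length_py
  rw [pv_A_eq_card, pv_B_eq_card]
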